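-- pv_equiv track=rewrite | github.com/jtc1246/pypi-netdisk | file_name_operations.py | path_elements
-- ===== SOURCE A (Python) =====
-- def remove_continuous_slashes(path: str) -> str:
--     while True:
--         l = len(path)
--         path = path.replace('//', '/')
--         if len(path) == l:
--             return path
--
-- def path_elements(path: str) -> list[str]:
--     path = remove_continuous_slashes(path)
--     if (path[-1] == '/'):
--         path = path[:-1]
--     path_elements = path.split('/')[1:]
--     elemnets = []
--     for pe in path_elements:
--         if pe == '.':
--             continue
--         if pe == '..':
--             if len(elemnets) > 0:
--                 elemnets.pop()
--             continue
--         elemnets.append(pe)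
--     return elemnets
-- ===== SOURCE B (Python) =====
-- def path_elements(path: str) -> list[str]:
--     # One split, one pass: everything before the first '/' is the root marker;
--     # empty parts (from repeated or trailing slashes) are skipped inline.
--     elems = []
--     for part in path.split('/')[1:]:
--         if not part or part == '.':
--             continue
--         if part == '..':
--             if elems:
--                 elems.pop()
--         else:
--             elems.append(part)
--     return elems
-- ===== Notes on version B (the rewrite author's own statement) =====
-- stated objective: simpler
-- what changed: B replaces A's replace('//','/')-until-fixpoint normalisation and trailing-slash stripping by a single split('/') and one pass that skips empty components while resolving '.' and '..'; Pre_ excludes only the empty string, on which A's path[-1] raises IndexError.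
import Mathlib
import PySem

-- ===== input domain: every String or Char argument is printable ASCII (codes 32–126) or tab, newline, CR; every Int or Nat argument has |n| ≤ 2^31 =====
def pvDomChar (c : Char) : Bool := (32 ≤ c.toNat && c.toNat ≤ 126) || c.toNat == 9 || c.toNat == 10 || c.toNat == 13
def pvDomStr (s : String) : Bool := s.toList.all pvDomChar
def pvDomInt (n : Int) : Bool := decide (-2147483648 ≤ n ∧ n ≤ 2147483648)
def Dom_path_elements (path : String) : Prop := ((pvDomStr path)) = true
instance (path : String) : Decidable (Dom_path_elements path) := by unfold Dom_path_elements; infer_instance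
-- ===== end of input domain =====

-- B replaces A's repeated replace('//','/')-until-fixpoint normalisation and trailing-slash
-- stripping by a single split('/') and one pass that skips empty components while resolving.

-- ===== PORT A =====
-- `rp` is one pass of s.replace('//','/') on the character list; it and the lemmas up to
-- `str_replace_len_le` exist only because `remove_continuous_slashes`'s termination proof
-- (decreasing_by below) needs them.
def rp : List Char → List Char
  | [] => []
  | [a] => [a]
  | a :: b :: t => if a = '/' ∧ b = '/' then '/' :: rp t else a :: rp (b :: t)

theorem rp_len_le (l : List Char) : (rp l).length ≤ l.length := by
  fun_induction rp l with
  | case1 => simp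
  | case2 => simp
  | case3 a b t h ih => simp only [List.length_cons] at ih ⊢; omega
  | case4 a b t h ih => simp only [List.length_cons] at ih ⊢; omega

theorem replace_go_eq (fuel : Nat) : ∀ (l acc : List Char), l.length ≤ fuel →
    PySem.Chars.replace.go ['/', '/'] ['/'] fuel l acc = acc.reverse ++ rp l := by
  induction fuel with
  | zero =>
    intro l acc h
    have : l = [] := by cases l <;> simp_all
    subst this
    simp [PySem.Chars.replace.go, rp]
  | succ n ih =>
    intro l acc h
    match l with
    | [] => simp [PySem.Chars.replace.go, rp]
    | [a] =>
      have hp : List.isPrefixOf ['/', '/'] [a] = false := by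
        simp [List.isPrefixOf]
      rw [PySem.Chars.replace.go, hp]
      simp only [Bool.false_eq_true, if_false]
      rw [ih [] (a :: acc) (by simp)]
      simp [rp]
    | a :: b :: t =>
      by_cases hab : a = '/' ∧ b = '/'
      · obtain ⟨ha, hb⟩ := hab; subst ha; subst hb
        rw [PySem.Chars.replace.go]
        simp only [List.isPrefixOf, BEq.rfl, Bool.and_true, List.length_cons, if_true]
        simp only [List.length_nil, List.drop_succ_cons, List.drop_zero, List.reverse_cons,
          List.reverse_nil, List.nil_append, List.singleton_append]
        rw [ih t ('/' :: acc) (by simp at h ⊢; omega)]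
        simp [rp]
      · rw [PySem.Chars.replace.go]
        have hp : List.isPrefixOf ['/', '/'] (a :: b :: t) = false := by
          simp [List.isPrefixOf]; intro h1 h2; exact hab ⟨h1.symm, h2.symm⟩
        rw [hp]
        simp only [Bool.false_eq_true, if_false]
        rw [ih (b :: t) (a :: acc) (by simp at h ⊢; omega)]
        simp [rp, hab]

theorem chars_replace_eq_rp (l : List Char) :
    PySem.Chars.replace l ['/', '/'] ['/'] = rp l := by
  rw [PySem.Chars.replace]
  simp only [List.isEmpty_cons, Bool.false_eq_true, if_false]
  exact (replace_go_eq l.length l [] le_rfl).trans (by simp)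

theorem str_replace_len_le (s : String) :
    PySem.Str.len (PySem.Str.replace s "//" "/") ≤ PySem.Str.len s := by
  simp only [PySem.Str.len_eq, PySem.Str.toList_replace]
  have : ("//" : String).toList = ['/', '/'] := rfl
  rw [this]
  have : ("/" : String).toList = ['/'] := rfl
  rw [this, chars_replace_eq_rp]
  exact_mod_cast rp_len_le s.toList

def remove_continuous_slashes (path : String) : String :=
  let l := PySem.Str.len path
  let p := PySem.Str.replace path "//" "/"
  if PySem.Str.len p = l then p else remove_continuous_slashes p
termination_by (PySem.Str.len path).toNat
decreasing_by
  have := str_replace_len_le path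
  have h0 : 0 ≤ PySem.Str.len (PySem.Str.replace path "//" "/") := by
    rw [PySem.Str.len_eq]; exact Int.natCast_nonneg _
  simp only [p, l] at *
  omega

def path_elements (path : String) : List String :=
  let path1 := remove_continuous_slashes path
  match PySem.Str.pyGet? path1 (-1) with   -- path[-1]; none = IndexError on "", excluded by Pre_
  | none => []
  | some c =>
    let path2 := if c = '/' then PySem.Str.slice path1 none (some (-1)) else path1
    -- path2.split('/')[1:]  (the separator "/" is nonempty, so split? is always `some`)
    let pes := PySem.List.slice ((PySem.Str.split? path2 "/").getD []) (some 1) none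
    pes.foldl (fun acc pe =>
      if pe = "." then acc
      else if pe = ".." then (if acc.length > 0 then acc.dropLast else acc)  -- .pop() on a nonempty list
      else acc ++ [pe]) []

-- ===== PORT B =====
def path_elements_alt (path : String) : List String :=
  (PySem.List.slice ((PySem.Str.split? path "/").getD []) (some 1) none).foldl
    (fun elems part =>
      if part = "" ∨ part = "." then elems
      else if part = ".." then (if elems ≠ [] then elems.dropLast else elems)
      else elems ++ [part]) []

-- ===== PRECONDITION & SPEC =====
-- Pre_ excludes only the empty string, on which A's path[-1] raises IndexError.
def Pre_path_elements (path : String) : Prop := path ≠ ""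
instance (path : String) : Decidable (Pre_path_elements path) := by unfold Pre_path_elements; infer_instance
def pvWitness_path_elements : String := "/a//b/./c/../d"

def Spec_path_elements (path : String) (out : List String) : Prop := out = path_elements_alt path
instance (path : String) (out : List String) : Decidable (Spec_path_elements path out) := by unfold Spec_path_elements; infer_instance

-- ===== CLAIM (what is proved, stated in full; the proofs are below) =====
def Claim_equal_path_elements : Prop := ∀ (path : String), Dom_path_elements path → Pre_path_elements path → Spec_path_elements path (path_elements path)

-- ===== LEMMAS AND PROOFS =====

theorem str_replace_toList (s : String) :
    (PySem.Str.replace s "//" "/").toList = rp s.toList := by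
  rw [PySem.Str.toList_replace, show ("//" : String).toList = ['/', '/'] from rfl,
    show ("/" : String).toList = ['/'] from rfl, chars_replace_eq_rp]

def collapse : List Char → List Char
  | [] => []
  | [a] => [a]
  | a :: b :: t => if a = '/' ∧ b = '/' then collapse (b :: t) else a :: collapse (b :: t)

theorem collapse_head? (l : List Char) : (collapse l).head? = l.head? := by
  fun_induction collapse l with
  | case1 => rfl
  | case2 => rfl
  | case3 a b t h ih => obtain ⟨h1, h2⟩ := h; subst h1; subst h2; rw [ih]; rfl
  | case4 a b t h ih => rfl

theorem collapse_ne_nil {l : List Char} (h : l ≠ []) : collapse l ≠ [] := by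
  intro hc
  have := collapse_head? l
  rw [hc] at this
  cases l with
  | nil => exact h rfl
  | cons a t => simp at this

theorem collapse_cons_ne {c : Char} (hc : c ≠ '/') (l : List Char) :
    collapse (c :: l) = c :: collapse l := by
  cases l with
  | nil => rfl
  | cons b t =>
    simp only [collapse, if_neg (fun h : c = '/' ∧ b = '/' => hc h.1)]

theorem collapse_slash_cons (l : List Char) :
    collapse ('/' :: l) = if (collapse l).head? = some '/' then collapse l else '/' :: collapse l := by
  cases l with
  | nil => simp [collapse]
  | cons b t =>
    rw [collapse_head?]
    by_cases hb : b = '/'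
    · subst hb; simp [collapse]
    · simp [collapse, hb]

theorem collapse_rp (l : List Char) : collapse (rp l) = collapse l := by
  fun_induction rp l with
  | case1 => rfl
  | case2 => rfl
  | case3 a b t h ih =>
    obtain ⟨h1, h2⟩ := h; subst h1; subst h2
    rw [collapse_slash_cons, ih, ← collapse_slash_cons]
    rfl
  | case4 a b t h ih =>
    by_cases ha : a = '/'
    · subst ha
      rw [collapse_slash_cons, ih, ← collapse_slash_cons]
    · rw [collapse_cons_ne ha, collapse_cons_ne ha, ih]

theorem rp_eq_of_len {l : List Char} (h : (rp l).length = l.length) : rp l = l := by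
  fun_induction rp l with
  | case1 => rfl
  | case2 => rfl
  | case3 a b t hab ih =>
    exfalso
    have := rp_len_le t
    have h3 : (b :: t).length = t.length + 1 := by simp
    simp only [List.length_cons] at h
    omega
  | case4 a b t hab ih =>
    simp only [List.length_cons] at h
    rw [ih (by simp only [List.length_cons]; omega)]

theorem collapse_of_rp_fix {l : List Char} (h : rp l = l) : collapse l = l := by
  fun_induction rp l with
  | case1 => rfl
  | case2 => rfl
  | case3 a b t hab ih =>
    exfalso
    have h1 := rp_len_le t
    have h2 := congrArg List.length h
    have h3 : (b :: t).length = t.length + 1 := by simp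
    simp only [List.length_cons] at h2
    omega
  | case4 a b t hab ih =>
    simp only [List.cons.injEq] at h
    rw [show collapse (a :: b :: t) = a :: collapse (b :: t) by simp [collapse, hab],
      ih h.2]

theorem rcs_toList (s : String) : (remove_continuous_slashes s).toList = collapse s.toList := by
  generalize hn : (PySem.Str.len s).toNat = n
  induction n using Nat.strong_induction_on generalizing s with
  | _ n ih =>
    rw [remove_continuous_slashes]
    split
    · rename_i heq
      rw [str_replace_toList]
      rw [PySem.Str.len_eq, PySem.Str.len_eq, str_replace_toList] at heq
      have : (rp s.toList).length = s.toList.length := by exact_mod_cast heq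
      rw [rp_eq_of_len this, collapse_of_rp_fix (rp_eq_of_len this)]
    · rename_i hne
      have hlt : (PySem.Str.len (PySem.Str.replace s "//" "/")).toNat < n := by
        have h1 := str_replace_len_le s
        have h0 : 0 ≤ PySem.Str.len (PySem.Str.replace s "//" "/") := by
          rw [PySem.Str.len_eq]; exact Int.natCast_nonneg _
        omega
      rw [ih _ hlt _ rfl, str_replace_toList, collapse_rp]

def spl : List Char → List (List Char)
  | [] => [[]]
  | c :: t => if c = '/' then [] :: spl t else (spl t).modifyHead (c :: ·)

theorem spl_ne_nil (l : List Char) : spl l ≠ [] := by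
  induction l with
  | nil => simp [spl]
  | cons c t ih =>
    simp only [spl]
    split
    · simp
    · cases hs : spl t with
      | nil => exact absurd hs ih
      | cons x xs => simp

theorem splitOn_go_eq (fuel : Nat) : ∀ (l cur : List Char) (acc : List (List Char)), l.length ≤ fuel →
    PySem.Chars.splitOn.go ['/'] fuel l cur acc
      = acc.reverse ++ ((spl l).modifyHead (cur.reverse ++ ·)) := by
  induction fuel with
  | zero =>
    intro l cur acc h
    have : l = [] := by cases l <;> simp_all
    subst this
    simp [PySem.Chars.splitOn.go, spl]
  | succ n ih =>
    intro l cur acc h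
    match l with
    | [] => simp [PySem.Chars.splitOn.go, spl]
    | c :: t =>
      by_cases hc : c = '/'
      · subst hc
        rw [PySem.Chars.splitOn.go]
        simp only [List.isPrefixOf, BEq.rfl, Bool.and_true, if_true]
        rw [show List.drop ['/'].length ('/' :: t) = t by simp]
        rw [ih t [] (cur.reverse :: acc) (by simp at h; omega)]
        simp only [spl, if_true, List.reverse_cons, List.reverse_nil, List.nil_append,
          List.modifyHead_cons, List.append_assoc, List.cons_append, List.nil_append]
        cases hs : spl t with
        | nil => exact absurd hs (spl_ne_nil t)
        | cons x xs => simp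
      · rw [PySem.Chars.splitOn.go]
        have hp : List.isPrefixOf ['/'] (c :: t) = false := by
          simp [List.isPrefixOf]; exact fun h => absurd h.symm hc
        rw [hp]
        simp only [Bool.false_eq_true, if_false]
        rw [ih t (c :: cur) acc (by simp at h; omega)]
        obtain ⟨x, xs, hx⟩ : ∃ x xs, spl t = x :: xs := by
          cases hs : spl t with
          | nil => exact absurd hs (spl_ne_nil t)
          | cons x xs => exact ⟨x, xs, rfl⟩
        simp [spl, hc, hx, List.modifyHead]

theorem splitOn_eq_spl (l : List Char) : PySem.Chars.splitOn l ['/'] = spl l := by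
  rw [PySem.Chars.splitOn, splitOn_go_eq (l.length + 1) l [] [] (by omega)]
  cases hs : spl l with
  | nil => exact absurd hs (spl_ne_nil l)
  | cons x xs => simp

theorem dropWhile_head {p : Char → Bool} : ∀ {l : List Char} {x : Char} {r : List Char},
    l.dropWhile p = x :: r → p x = false := by
  intro l
  induction l with
  | nil => intro x r h; simp at h
  | cons a t ih =>
    intro x r h
    by_cases ha : p a
    · rw [List.dropWhile_cons_of_pos ha] at h; exact ih h
    · rw [List.dropWhile_cons_of_neg ha] at h
      cases h
      simpa using ha

theorem spl_shape1 : ∀ {l : List Char}, l.dropWhile (· ≠ '/') = [] → spl l = [l] := by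
  intro l
  induction l with
  | nil => intro _; rfl
  | cons c t ih =>
    intro h
    by_cases hc : c = '/'
    · subst hc; simp [List.dropWhile] at h
    · rw [List.dropWhile_cons_of_pos (by simpa using hc)] at h
      simp [spl, hc, ih h]

theorem spl_shape2 : ∀ {l : List Char} {x r}, l.dropWhile (· ≠ '/') = x :: r →
    spl l = l.takeWhile (· ≠ '/') :: spl r := by
  intro l
  induction l with
  | nil => intro x r h; simp at h
  | cons c t ih =>
    intro x r h
    by_cases hc : c = '/'
    · subst hc
      rw [List.dropWhile_cons_of_neg (by simp)] at h
      cases h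
      simp [spl, List.takeWhile]
    · rw [List.dropWhile_cons_of_pos (by simpa using hc)] at h
      rw [List.takeWhile_cons_of_pos (by simpa using hc)]
      simp [spl, hc, ih h]

def toks : List Char → List (List Char)
  | [] => []
  | c :: t =>
    if c = '/' then toks t
    else (c :: t.takeWhile (· ≠ '/')) :: toks (t.dropWhile (· ≠ '/'))
termination_by l => l.length
decreasing_by
  · simp
  · have := List.length_dropWhile_le (p := fun x => decide (x ≠ '/')) (l := t)
    simp only [List.length_cons]
    omega

theorem toks_eq_filter_spl (l : List Char) : toks l = (spl l).filter (· ≠ []) := by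
  induction hn : l.length using Nat.strong_induction_on generalizing l with
  | _ n ih =>
    subst hn
    match l with
    | [] => simp [toks, spl]
    | c :: t =>
      by_cases hc : c = '/'
      · subst hc
        rw [show toks ('/' :: t) = toks t by simp [toks]]
        rw [ih t.length (by simp) t rfl]
        simp [spl]
      · rw [show toks (c :: t) = (c :: t.takeWhile (· ≠ '/')) :: toks (t.dropWhile (· ≠ '/')) by
          simp [toks, hc]]
        cases hd : t.dropWhile (· ≠ '/') with
        | nil =>
          rw [spl_shape1 (by rw [List.dropWhile_cons_of_pos (by simpa using hc)]; exact hd)]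
          rw [show t.takeWhile (· ≠ '/') = t by
            conv_rhs => rw [← List.takeWhile_append_dropWhile (p := fun x => decide (x ≠ '/')) (l := t)]
            rw [hd, List.append_nil]]
          simp [toks]
        | cons x r =>
          have hx : x = '/' := by
            have := dropWhile_head hd
            simpa using this
          subst hx
          rw [spl_shape2 (x := '/') (r := r)
            (by rw [List.dropWhile_cons_of_pos (by simpa using hc)]; exact hd)]
          rw [List.takeWhile_cons_of_pos (by simpa using hc)]
          have hlen : r.length < (c :: t).length := by
            have := List.length_dropWhile_le (p := fun x => decide (x ≠ '/')) (l := t)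
            rw [hd] at this
            simp only [List.length_cons] at this ⊢
            omega
          rw [show toks ('/' :: r) = toks r by simp [toks], ih r.length hlen r rfl]
          simp

theorem takeWhile_collapse (l : List Char) :
    (collapse l).takeWhile (· ≠ '/') = l.takeWhile (· ≠ '/') := by
  fun_induction collapse l with
  | case1 => rfl
  | case2 => rfl
  | case3 a b t h ih =>
    obtain ⟨h1, h2⟩ := h; subst h1; subst h2
    rw [ih]
    rw [List.takeWhile_cons_of_neg (by simp), List.takeWhile_cons_of_neg (by simp)]
  | case4 a b t h ih =>
    by_cases ha : a = '/'
    · subst ha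
      rw [List.takeWhile_cons_of_neg (by simp), List.takeWhile_cons_of_neg (by simp)]
    · rw [List.takeWhile_cons_of_pos (by simpa using ha),
        List.takeWhile_cons_of_pos (by simpa using ha), ih]

theorem dropWhile_collapse (l : List Char) :
    (collapse l).dropWhile (· ≠ '/') = collapse (l.dropWhile (· ≠ '/')) := by
  fun_induction collapse l with
  | case1 => rfl
  | case2 a =>
    by_cases ha : a = '/'
    · subst ha; rfl
    · rw [List.dropWhile_cons_of_pos (by simpa using ha)]
      rfl
  | case3 a b t h ih =>
    obtain ⟨h1, h2⟩ := h; subst h1; subst h2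
    rw [ih]
    rw [List.dropWhile_cons_of_neg (by simp), List.dropWhile_cons_of_neg (by simp)]
    simp [collapse]
  | case4 a b t h ih =>
    by_cases ha : a = '/'
    · subst ha
      have hb : ¬b = '/' := fun hb => h ⟨rfl, hb⟩
      rw [List.dropWhile_cons_of_neg (by simp), List.dropWhile_cons_of_neg (by simp)]
      rw [show collapse ('/' :: b :: t) = '/' :: collapse (b :: t) by simp [collapse, hb]]
    · rw [List.dropWhile_cons_of_pos (by simpa using ha),
        List.dropWhile_cons_of_pos (by simpa using ha), ih]

theorem toks_collapse (l : List Char) : toks (collapse l) = toks l := by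
  induction hn : l.length using Nat.strong_induction_on generalizing l with
  | _ n ih =>
    subst hn
    match l with
    | [] => rfl
    | [a] => rfl
    | a :: b :: t =>
      by_cases hab : a = '/' ∧ b = '/'
      · obtain ⟨h1, h2⟩ := hab; subst h1; subst h2
        rw [show collapse ('/' :: '/' :: t) = collapse ('/' :: t) by simp [collapse]]
        rw [ih ('/' :: t).length (by simp) ('/' :: t) rfl]
        rw [show toks ('/' :: '/' :: t) = toks ('/' :: t) by simp [toks]]
      · rw [show collapse (a :: b :: t) = a :: collapse (b :: t) by simp [collapse, hab]]
        by_cases ha : a = '/'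
        · subst ha
          rw [show toks ('/' :: collapse (b :: t)) = toks (collapse (b :: t)) by simp [toks]]
          rw [show toks ('/' :: b :: t) = toks (b :: t) by simp [toks]]
          exact ih (b :: t).length (by simp) (b :: t) rfl
        · rw [show toks (a :: collapse (b :: t)) =
              (a :: (collapse (b :: t)).takeWhile (· ≠ '/')) ::
                toks ((collapse (b :: t)).dropWhile (· ≠ '/')) by simp [toks, ha]]
          rw [show toks (a :: b :: t) =
              (a :: (b :: t).takeWhile (· ≠ '/')) :: toks ((b :: t).dropWhile (· ≠ '/')) by
            simp [toks, ha]]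
          rw [takeWhile_collapse, dropWhile_collapse]
          have hlen : ((b :: t).dropWhile (· ≠ '/')).length < (a :: b :: t).length := by
            have := List.length_dropWhile_le (p := fun x => decide (x ≠ '/')) (l := b :: t)
            simp only [List.length_cons] at this ⊢
            omega
          rw [ih _ hlen _ rfl]

def strT (l : List Char) : List Char := if l.getLast? = some '/' then l.dropLast else l

def noDD : List Char → Prop
  | [] => True
  | [_] => True
  | a :: b :: t => ¬(a = '/' ∧ b = '/') ∧ noDD (b :: t)

theorem noDD_collapse (l : List Char) : noDD (collapse l) := by
  fun_induction collapse l with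
  | case1 => trivial
  | case2 => trivial
  | case3 a b t h ih => exact ih
  | case4 a b t h ih =>
    cases hcb : collapse (b :: t) with
    | nil => trivial
    | cons c r =>
      have hc : c = b := by
        have := collapse_head? (b :: t)
        rw [hcb] at this
        simpa using this
      refine ⟨?_, by rw [← hcb]; exact ih⟩
      rw [hc]
      exact h

theorem key2 : ∀ {l : List Char}, noDD l → l ≠ [] →
    spl (strT l) = if l.head? = some '/' then [] :: toks l else toks l := by
  intro l
  induction hn : l.length using Nat.strong_induction_on generalizing l with
  | _ n ih =>
    subst hn
    match l with
    | [] => intro _ h; exact absurd rfl h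
    | [a] =>
      intro _ _
      by_cases ha : a = '/'
      · subst ha; simp [strT, spl, toks]
      · simp [strT, spl, toks, ha]
    | a :: b :: t =>
      intro hdd _
      have hstep : strT (a :: b :: t) = a :: strT (b :: t) := by
        rw [strT, strT, List.getLast?_cons_cons]
        split
        · rw [List.dropLast_cons_of_ne_nil (by simp)]
        · rfl
      rw [hstep]
      obtain ⟨hab, hdd'⟩ := hdd
      have iht := ih (b :: t).length (by simp) rfl hdd' (by simp)
      by_cases ha : a = '/'
      · subst ha
        have hb : ¬b = '/' := fun hb => hab ⟨rfl, hb⟩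
        rw [show spl ('/' :: strT (b :: t)) = [] :: spl (strT (b :: t)) by simp [spl]]
        rw [iht, if_neg (by simpa using hb)]
        rw [show toks ('/' :: b :: t) = toks (b :: t) by simp [toks]]
        simp
      · rw [show spl (a :: strT (b :: t)) = (spl (strT (b :: t))).modifyHead (a :: ·) by
          simp [spl, ha]]
        rw [iht]
        by_cases hb : b = '/'
        · subst hb
          rw [if_pos (by simp), List.modifyHead_cons, if_neg (by simpa using ha)]
          rw [show toks (a :: '/' :: t) = (a :: ('/' :: t).takeWhile (· ≠ '/')) ::
              toks (('/' :: t).dropWhile (· ≠ '/')) by simp [toks, ha]]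
          rw [List.takeWhile_cons_of_neg (by simp), List.dropWhile_cons_of_neg (by simp)]
        · rw [if_neg (by simpa using hb), if_neg (by simpa using ha)]
          rw [show toks (b :: t) = (b :: t.takeWhile (· ≠ '/')) :: toks (t.dropWhile (· ≠ '/')) by
            simp [toks, hb]]
          rw [show toks (a :: b :: t) = (a :: (b :: t).takeWhile (· ≠ '/')) ::
              toks ((b :: t).dropWhile (· ≠ '/')) by simp [toks, ha]]
          rw [List.takeWhile_cons_of_pos (by simpa using hb),
            List.dropWhile_cons_of_pos (by simpa using hb)]
          rfl

theorem key (l : List Char) (hne : l ≠ []) :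
    spl (strT (collapse l)) = if l.head? = some '/' then [] :: toks l else toks l := by
  rw [key2 (noDD_collapse l) (collapse_ne_nil hne), collapse_head?, toks_collapse]

theorem split_getD_eq (s : String) :
    (PySem.Str.split? s "/").getD [] = (spl s.toList).map String.ofList := by
  rw [PySem.Str.split?, PySem.Chars.split?]
  rw [show ("/" : String).toList = ['/'] from rfl]
  simp [splitOn_eq_spl]

-- A's resolving step and B's resolving step agree once the empty parts are filtered out.
theorem foldl_B_filter (l : List String) (acc : List String) :
    l.foldl (fun elems part =>
      if part = "" ∨ part = "." then elems
      else if part = ".." then (if elems ≠ [] then elems.dropLast else elems)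
      else elems ++ [part]) acc
    = (l.filter (· ≠ "")).foldl (fun acc pe =>
      if pe = "." then acc
      else if pe = ".." then (if acc.length > 0 then acc.dropLast else acc)
      else acc ++ [pe]) acc := by
  induction l generalizing acc with
  | nil => rfl
  | cons p t ih =>
    by_cases hp : p = ""
    · subst hp
      rw [List.foldl_cons, if_pos (Or.inl rfl), List.filter_cons_of_neg (by simp)]
      exact ih acc
    · rw [List.filter_cons_of_pos (by simpa using hp), List.foldl_cons, List.foldl_cons]
      rw [show (if p = "" ∨ p = "." then acc
          else if p = ".." then (if acc ≠ [] then acc.dropLast else acc) else acc ++ [p])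
        = (if p = "." then acc
          else if p = ".." then (if acc.length > 0 then acc.dropLast else acc) else acc ++ [p]) by
        by_cases h1 : p = "."
        · simp [h1]
        · rw [if_neg (by simp [hp, h1]), if_neg h1]
          by_cases h2 : p = ".."
          · rw [if_pos h2, if_pos h2]
            by_cases h3 : acc = [] <;> simp [h3]
          · rw [if_neg h2, if_neg h2]]
      exact ih _

-- tail of the raw split, with empties removed, is exactly the token list after the first '/'
theorem filter_tail_spl (l : List Char) :
    ((spl l).tail).filter (· ≠ []) = toks (l.dropWhile (· ≠ '/')) := by
  cases hd : l.dropWhile (· ≠ '/') with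
  | nil =>
    rw [spl_shape1 hd]
    simp [toks]
  | cons x r =>
    have hx : x = '/' := by simpa using dropWhile_head hd
    subst hx
    rw [spl_shape2 hd]
    rw [show toks ('/' :: r) = toks r by simp [toks]]
    simp only [List.tail_cons]
    exact (toks_eq_filter_spl r).symm

theorem A_pieces_eq (l : List Char) (hne : l ≠ []) :
    (if l.head? = some '/' then [] :: toks l else toks l).tail
      = toks (l.dropWhile (· ≠ '/')) := by
  cases l with
  | nil => exact absurd rfl hne
  | cons c t =>
    by_cases hc : c = '/'
    · subst hc
      rw [if_pos (by simp), List.tail_cons, List.dropWhile_cons_of_neg (by simp)]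
    · rw [if_neg (by simpa using hc)]
      rw [show toks (c :: t) = (c :: t.takeWhile (· ≠ '/')) :: toks (t.dropWhile (· ≠ '/')) by
        simp [toks, hc]]
      rw [List.tail_cons, List.dropWhile_cons_of_pos (by simpa using hc)]

theorem filter_map_ofList (xs : List (List Char)) :
    (xs.map String.ofList).filter (fun p => p ≠ "") = (xs.filter (· ≠ [])).map String.ofList := by
  rw [List.filter_map]
  congr 1
  apply List.filter_congr
  intro x _
  simp only [Function.comp_apply, decide_eq_decide]
  constructor
  · intro h1 h2
    exact h1 (by rw [h2])
  · intro h1 h2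
    apply h1
    have := congrArg String.toList h2
    rwa [String.toList_ofList] at this

theorem main_eq (path : String) (hpre : path ≠ "") :
    path_elements path = path_elements_alt path := by
  have hcs : path.toList ≠ [] := by
    intro h
    apply hpre
    have := congrArg String.ofList h
    rwa [String.ofList_toList] at this
  -- A side
  have hq : (remove_continuous_slashes path).toList = collapse path.toList := rcs_toList path
  have hqne : (remove_continuous_slashes path).toList ≠ [] := by
    rw [hq]; exact collapse_ne_nil hcs
  have hget : PySem.Str.pyGet? (remove_continuous_slashes path) (-1)
      = some ((remove_continuous_slashes path).toList.getLast hqne) := by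
    rw [PySem.Str.pyGet?_eq, PySem.Chars.pyGet?_eq_listPyGet?]
    conv_lhs => rw [← List.dropLast_append_getLast hqne]
    exact PySem.List.pyGet?_neg_one_append_singleton _ _
  rw [path_elements]
  simp only [hget]
  set x := (remove_continuous_slashes path).toList.getLast hqne with hx
  have hlast : (remove_continuous_slashes path).toList.getLast? = some x := by
    exact List.getLast?_eq_some_getLast hqne
  -- the stripped string of A has character list strT (collapse path.toList)
  have hstrip : (if x = '/' then PySem.Str.slice (remove_continuous_slashes path) none (some (-1))
      else remove_continuous_slashes path).toList = strT (collapse path.toList) := by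
    by_cases hx' : x = '/'
    · rw [if_pos hx', PySem.Str.slice_to_neg_one, strT, if_pos (by rw [← hq, hlast, hx']), hq]
    · rw [if_neg hx', strT, if_neg (by rw [← hq, hlast]; simpa using hx'), hq]
  rw [path_elements_alt]
  simp only [split_getD_eq, PySem.List.slice_from_one]
  rw [hstrip, key path.toList hcs]
  -- both folds run over the tokens after the first '/', with A's step function
  rw [foldl_B_filter, ← List.map_tail, ← List.map_tail, filter_map_ofList, filter_tail_spl,
    A_pieces_eq path.toList hcs]

-- ===== VERDICT (by name: the statement is the Claim_ definition above) =====
theorem path_elements_spec : Claim_equal_path_elements := by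
  intro path _ hpre
  unfold Spec_path_elements
  exact main_eq path hpre
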